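-- pv_equiv track=rewrite | github.com/amitbisht1205/astro_project9650 | astroapp/views.py | getSoulNumber
-- ===== SOURCE A (Python) =====
-- def getSoulNumber(name_list):
--     sn =0
--     for ch in name_list:
--         if (ch == 'A' or ch == 'I'):
--             sn += 1
--         if (ch == 'E'):
--             sn += 5
--         if (ch == 'U'):
--             sn += 6
--         if (ch == 'O'):
--             sn += 7
--     if(sn == 11 or sn ==22):
--         return sn
--     num1 = sn%10
--     num2 = (int( sn/10))
--     sn = num1+num2
--     return sn
-- ===== SOURCE B (Python) =====
-- def getSoulNumber(name_list):
--     W = {'A': 1, 'I': 1, 'E': 5, 'U': 6, 'O': 7}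
--
--     def total(lst):
--         if not lst:
--             return 0
--         if len(lst) == 1:
--             return W.get(lst[0], 0)
--         m = len(lst) // 2
--         return total(lst[:m]) + total(lst[m:])
--
--     sn = total(name_list)
--     if sn == 11 or sn == 22:
--         return sn
--     return sn % 10 + sn // 10
-- ===== Notes on version B (the rewrite author's own statement) =====
-- stated objective: alternative
-- what changed: Replaces A's single left-to-right branching accumulator loop with a recursive divide-and-conquer: the weighted sum is computed by splitting the list in halves and combining, with per-element weight taken from a dict table instead of chained if-branches; the final reduction is one expression sn%10 + sn//10 (sn is nonnegative, so int(sn/10) == sn//10).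
import Mathlib
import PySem

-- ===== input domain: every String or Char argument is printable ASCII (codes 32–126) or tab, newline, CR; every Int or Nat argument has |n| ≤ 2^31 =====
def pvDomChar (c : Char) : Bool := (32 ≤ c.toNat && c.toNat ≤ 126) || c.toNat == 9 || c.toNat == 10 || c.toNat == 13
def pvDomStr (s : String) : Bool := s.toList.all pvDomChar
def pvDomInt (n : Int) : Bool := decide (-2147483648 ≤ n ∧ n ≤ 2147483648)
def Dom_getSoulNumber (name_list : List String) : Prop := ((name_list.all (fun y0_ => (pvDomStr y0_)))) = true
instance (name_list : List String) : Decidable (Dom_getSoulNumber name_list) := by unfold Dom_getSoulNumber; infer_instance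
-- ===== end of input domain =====

-- B replaces A's single branching accumulator loop by a recursive divide-and-conquer
-- over list halves with a dict weight table (objective: alternative).

-- ===== PORT A =====
-- one branching loop accumulating sn, then the reduction tail.
-- int(sn/10) truncates toward zero; sn here is a small nonneg int, so float division is
-- exact and Int.tdiv is the faithful port.
def getSoulNumber (name_list : List String) : Int :=
  let sn : Int := name_list.foldl (fun sn ch =>
    let sn := if ch = "A" ∨ ch = "I" then sn + 1 else sn
    let sn := if ch = "E" then sn + 5 else sn
    let sn := if ch = "U" then sn + 6 else sn
    if ch = "O" then sn + 7 else sn) 0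
  if sn = 11 ∨ sn = 22 then sn
  else
    let num1 := PySem.Int.mod sn 10
    let num2 := Int.tdiv sn 10
    num1 + num2

-- ===== PORT B =====
-- the weight dict W of Source B
def pvWTable : PySem.Dict String Int :=
  PySem.Dict.mk [("A", 1), ("I", 1), ("E", 5), ("U", 6), ("O", 7)]

-- Source B's inner 'total': divide and conquer on halves; lst[:m] / lst[m:] with
-- m = len//2 are exactly take m / drop m (nonnegative in-range bound).
def pvTotal : List String → Int
  | [] => 0
  | [ch] => PySem.Dict.getD pvWTable ch 0
  | a :: b :: rest =>
    let m := (a :: b :: rest).length / 2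
    pvTotal ((a :: b :: rest).take m) + pvTotal ((a :: b :: rest).drop m)
termination_by l => l.length
decreasing_by
  · simp only [List.length_take, List.length_cons]; omega
  · simp only [List.length_drop, List.length_cons]; omega

def getSoulNumber_alt (name_list : List String) : Int :=
  let sn := pvTotal name_list
  if sn = 11 ∨ sn = 22 then sn
  else PySem.Int.mod sn 10 + PySem.Int.floordiv sn 10

-- ===== PRECONDITION & SPEC =====
def Spec_getSoulNumber (name_list : List String) (out : Int) : Prop := out = getSoulNumber_alt name_list
instance (name_list : List String) (out : Int) : Decidable (Spec_getSoulNumber name_list out) := by unfold Spec_getSoulNumber; infer_instance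

-- ===== CLAIM (what is proved, stated in full; the proofs are below) =====
def Claim_equal_getSoulNumber : Prop := ∀ (name_list : List String), Dom_getSoulNumber name_list → Spec_getSoulNumber name_list (getSoulNumber name_list)

-- ===== LEMMAS AND PROOFS =====

-- per-element weight of A's loop body
def pvW1 (ch : String) : Int :=
  (if ch = "A" ∨ ch = "I" then 1 else 0) + (if ch = "E" then 5 else 0)
    + (if ch = "U" then 6 else 0) + (if ch = "O" then 7 else 0)

def pvW (l : List String) : Int := (l.map pvW1).sum

lemma pvW1_nonneg (ch : String) : 0 ≤ pvW1 ch := by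
  unfold pvW1; split_ifs <;> norm_num

lemma pvW_nonneg (l : List String) : 0 ≤ pvW l := by
  unfold pvW
  apply List.sum_nonneg
  intro x hx
  obtain ⟨ch, _, rfl⟩ := List.mem_map.mp hx
  exact pvW1_nonneg ch

lemma pvW_append (l₁ l₂ : List String) : pvW (l₁ ++ l₂) = pvW l₁ + pvW l₂ := by
  simp [pvW]

lemma weight_eq (ch : String) : PySem.Dict.getD pvWTable ch 0 = pvW1 ch := by
  simp only [pvWTable, pvW1, PySem.Dict.getD, PySem.Dict.get?_mk_cons]
  by_cases h1 : ch = "A" <;> by_cases h2 : ch = "I" <;> by_cases h3 : ch = "E"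
    <;> by_cases h4 : ch = "U" <;> by_cases h5 : ch = "O" <;>
    simp_all [PySem.Dict.get?, @eq_comm String]

lemma pvTotal_eq (l : List String) : pvTotal l = pvW l := by
  induction l using pvTotal.induct with
  | case1 => simp [pvTotal, pvW]
  | case2 ch => simp [pvTotal, pvW, weight_eq]
  | case3 a b rest m ih1 ih2 =>
    rw [pvTotal, ih1, ih2, ← pvW_append, List.take_append_drop]

lemma foldl_eq_add_pvW (l : List String) (a : Int) :
    l.foldl (fun sn ch =>
      let sn := if ch = "A" ∨ ch = "I" then sn + 1 else sn
      let sn := if ch = "E" then sn + 5 else sn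
      let sn := if ch = "U" then sn + 6 else sn
      if ch = "O" then sn + 7 else sn) a = a + pvW l := by
  induction l generalizing a with
  | nil => simp [pvW]
  | cons h t ih =>
    rw [List.foldl_cons, ih]
    show (let sn := if h = "A" ∨ h = "I" then a + 1 else a
          let sn := if h = "E" then sn + 5 else sn
          let sn := if h = "U" then sn + 6 else sn
          if h = "O" then sn + 7 else sn) + pvW t = a + pvW (h :: t)
    simp only [pvW, List.map_cons, List.sum_cons, pvW1]
    split_ifs <;> ring

lemma tdiv_eq_floordiv_of_nonneg (n : Int) (hn : 0 ≤ n) :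
    Int.tdiv n 10 = PySem.Int.floordiv n 10 := by
  rw [PySem.Int.floordiv_eq_ediv_of_pos (b := 10) (by norm_num), Int.tdiv_eq_ediv]
  omega

-- ===== VERDICT (by name: the statement is the Claim_ definition above) =====
theorem getSoulNumber_spec : Claim_equal_getSoulNumber := by
  intro name_list _
  unfold Spec_getSoulNumber getSoulNumber getSoulNumber_alt
  simp only [foldl_eq_add_pvW, zero_add, pvTotal_eq]
  rw [tdiv_eq_floordiv_of_nonneg _ (pvW_nonneg name_list)]
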